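-- pv_equiv track=rewrite | github.com/robbiet76/xLightsDesigner | scripts/sequencer-render-training/analysis/framework.py | _frame_segments
-- ===== SOURCE A (Python) =====
-- from typing import Any, Dict, List, Protocol
--
-- def _frame_segments(frame: Dict[str, Any]) -> List[Dict[str, int]]:
--     active = frame.get("nodeActive", [])
--     if not isinstance(active, list):
--         return []
--     segments: List[Dict[str, int]] = []
--     start = None
--     for idx, raw in enumerate(active):
--         is_on = bool(raw)
--         if is_on and start is None:
--             start = idx
--         elif not is_on and start is not None:
--             end = idx - 1
--             segments.append({"start": start, "end": end, "length": end - start + 1})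
--             start = None
--     if start is not None:
--         end = len(active) - 1
--         segments.append({"start": start, "end": end, "length": end - start + 1})
--     return segments
-- ===== SOURCE B (Python) =====
-- from itertools import dropwhile, takewhile
-- from typing import Any, Dict, List
--
--
-- def _frame_segments(frame: Dict[str, Any]) -> List[Dict[str, int]]:
--     active = frame.get("nodeActive", [])
--     if not isinstance(active, list):
--         return []
--
--     def go(pairs):
--         pairs = list(dropwhile(lambda p: not p[1], pairs))
--         if not pairs:
--             return []
--         run = list(takewhile(lambda p: bool(p[1]), pairs[1:]))
--         start = pairs[0][0]
--         end = run[-1][0] if run else start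
--         rest = pairs[1 + len(run):]
--         return [{"start": start, "end": end, "length": end - start + 1}] + go(rest)
--
--     return go(list(enumerate(active)))
-- ===== Notes on version B (the rewrite author's own statement) =====
-- stated objective: idiomatic
-- what changed: Replaces A's sentinel/state-machine loop (a 'start' variable plus a separate tail-flush) by an itertools-style chunked decomposition: dropwhile to the next truthy run, takewhile to its end, emit the segment, recurse on the remainder.
import Mathlib
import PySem

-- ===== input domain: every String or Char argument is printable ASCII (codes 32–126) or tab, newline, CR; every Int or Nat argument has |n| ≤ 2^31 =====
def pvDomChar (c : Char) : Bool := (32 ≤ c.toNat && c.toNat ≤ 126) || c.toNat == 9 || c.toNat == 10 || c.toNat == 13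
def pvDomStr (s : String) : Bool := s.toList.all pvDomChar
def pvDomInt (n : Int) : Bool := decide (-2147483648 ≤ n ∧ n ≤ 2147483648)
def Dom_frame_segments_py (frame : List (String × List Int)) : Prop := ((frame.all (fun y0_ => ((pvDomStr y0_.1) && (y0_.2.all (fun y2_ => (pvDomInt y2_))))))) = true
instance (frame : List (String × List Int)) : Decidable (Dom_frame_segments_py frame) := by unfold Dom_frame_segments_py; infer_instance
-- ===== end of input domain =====

-- B replaces A's sentinel/state-machine scan by an idiomatic chunked decomposition
-- (dropwhile to the next run, takewhile to its end, recurse on the remainder);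
-- equivalence of the RETURN value is proved for all inputs.

-- {"start": s, "end": e, "length": e - s + 1} as an insertion-ordered association list
def pvMkSeg (s e : Int) : List (String × Int) :=
  [("start", s), ("end", e), ("length", e - s + 1)]

-- ===== PORT A =====
-- one iteration of A's for-loop: state = (segments, start); branches in A's order
def pvAStep (st : Array (List (String × Int)) × Option Int) (p : Int × Int) :
    Array (List (String × Int)) × Option Int :=
  match st with
  | (segs, start) =>
    let isOn := p.2 != 0
    match start with
    | none => if isOn then (segs, some p.1) else (segs, none)
    | some s => if isOn then (segs, some s) else (segs.push (pvMkSeg s (p.1 - 1)), none)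

def frame_segments_py (frame : List (String × List Int)) : List (List (String × Int)) :=
  let active := (PySem.Dict.mk frame).getD "nodeActive" []
  -- `isinstance(active, list)` is always True here: active : List Int by the type convention
  let st := (PySem.List.enumerate active 0).foldl pvAStep (#[], none)
  (match st.2 with
   | some s => st.1.push (pvMkSeg s ((active.length : Int) - 1))
   | none => st.1).toList

-- ===== PORT B =====
-- go(pairs) from Source B: dropwhile the falsy prefix, takewhile the run, recurse on the rest
def pvAltGo (pairs : List (Int × Int)) : List (List (String × Int)) :=
  match h : pairs.dropWhile (fun p => !(p.2 != 0)) with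
  | [] => []
  | p :: tl =>
    let run := tl.takeWhile (fun q => q.2 != 0)
    let start := p.1
    let stop := (run.getLast?.getD p).1
    let rest := tl.drop run.length
    pvMkSeg start stop :: pvAltGo rest
termination_by pairs.length
decreasing_by
  have h1 : (pairs.dropWhile (fun p => !(p.2 != 0))).length ≤ pairs.length :=
    List.length_dropWhile_le _ _
  rw [h] at h1
  simp only [List.length_cons] at h1
  have h2 : (tl.drop (tl.takeWhile (fun q => q.2 != 0)).length).length ≤ tl.length := by
    simp [List.length_drop]
  omega

def frame_segments_py_alt (frame : List (String × List Int)) : List (List (String × Int)) :=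
  let active := (PySem.Dict.mk frame).getD "nodeActive" []
  pvAltGo (PySem.List.enumerate active 0)

-- ===== PRECONDITION & SPEC =====
def Spec_frame_segments_py (frame : List (String × List Int)) (out : List (List (String × Int))) : Prop := out = frame_segments_py_alt frame
instance (frame : List (String × List Int)) (out : List (List (String × Int))) : Decidable (Spec_frame_segments_py frame out) := by unfold Spec_frame_segments_py; infer_instance

-- ===== CLAIM (what is proved, stated in full; the proofs are below) =====
def Claim_equal_frame_segments_py : Prop := ∀ (frame : List (String × List Int)), Dom_frame_segments_py frame → Spec_frame_segments_py frame (frame_segments_py frame)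

-- ===== LEMMAS AND PROOFS =====

-- canonical recursive description of the run decomposition, shared by both proofs
def pvRuns (st : Option Int) (i : Int) (xs : List Int) : List (List (String × Int)) :=
  match xs, st with
  | [], none => []
  | [], some s => [pvMkSeg s (i - 1)]
  | x :: rest, none => if x != 0 then pvRuns (some i) (i + 1) rest else pvRuns none (i + 1) rest
  | x :: rest, some s => if x != 0 then pvRuns (some s) (i + 1) rest
                         else pvMkSeg s (i - 1) :: pvRuns none (i + 1) rest

-- ----- A equals pvRuns -----
theorem pvA_eq_runs (xs : List Int) : ∀ (i : Int) (segs : Array (List (String × Int))) (st : Option Int),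
    (match ((PySem.List.enumerate xs i).foldl pvAStep (segs, st)).2 with
     | some s => (((PySem.List.enumerate xs i).foldl pvAStep (segs, st)).1.push
                   (pvMkSeg s (i + (xs.length : Int) - 1)))
     | none => ((PySem.List.enumerate xs i).foldl pvAStep (segs, st)).1).toList
    = segs.toList ++ pvRuns st i xs := by
  induction xs with
  | nil =>
    intro i segs st
    cases st <;> simp [PySem.List.enumerate, pvRuns, Array.toList_push]
  | cons x rest ih =>
    intro i segs st
    rw [PySem.List.enumerate_cons]
    cases st with
    | none =>
      by_cases hx : x = 0
      · simpa [pvRuns, List.foldl_cons, pvAStep, hx, Int.add_comm, Int.add_assoc,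
          Int.add_sub_assoc] using ih (i + 1) segs none
      · have := ih (i + 1) segs (some i)
        simpa [pvRuns, List.foldl_cons, pvAStep, hx, Int.add_comm, Int.add_assoc,
          Int.add_sub_assoc] using this
    | some s =>
      by_cases hx : x = 0
      · have := ih (i + 1) (segs.push (pvMkSeg s (i - 1))) none
        simpa [pvRuns, List.foldl_cons, pvAStep, hx, Int.add_comm, Int.add_assoc,
          Int.add_sub_assoc, Array.toList_push] using this
      · have := ih (i + 1) segs (some s)
        simpa [pvRuns, List.foldl_cons, pvAStep, hx, Int.add_comm, Int.add_assoc,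
          Int.add_sub_assoc] using this

-- ----- enumerate bookkeeping -----
theorem pv_enum_takeWhile (xs : List Int) : ∀ i : Int,
    (PySem.List.enumerate xs i).takeWhile (fun q => q.2 != 0)
    = PySem.List.enumerate (xs.takeWhile (fun x => x != 0)) i := by
  induction xs with
  | nil => intro i; simp [PySem.List.enumerate]
  | cons x rest ih =>
    intro i
    rw [PySem.List.enumerate_cons]
    by_cases hx : x = 0
    · simp [List.takeWhile_cons, hx, PySem.List.enumerate]
    · simp [List.takeWhile_cons, hx, PySem.List.enumerate_cons, ih]

theorem pv_enum_drop (xs : List Int) : ∀ (n : Nat) (i : Int),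
    (PySem.List.enumerate xs i).drop n = PySem.List.enumerate (xs.drop n) (i + n) := by
  induction xs with
  | nil => intro n i; simp [PySem.List.enumerate]
  | cons x rest ih =>
    intro n i
    cases n with
    | zero => simp
    | succ m =>
      rw [PySem.List.enumerate_cons]
      simpa [Int.add_comm, Int.add_assoc, Int.add_left_comm] using ih m (i + 1)

theorem pv_enum_getLast (xs : List Int) : ∀ (j : Int) (d : Int × Int),
    (((PySem.List.enumerate xs j).getLast?).getD d).1
    = if xs = [] then d.1 else j + (xs.length : Int) - 1 := by
  induction xs with
  | nil => intro j d; simp [PySem.List.enumerate]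
  | cons y rest ih =>
    intro j d
    rw [PySem.List.enumerate_cons]
    cases rest with
    | nil => simp [PySem.List.enumerate]
    | cons z zs =>
      rw [PySem.List.enumerate_cons]
      have h := ih (j + 1) d
      rw [PySem.List.enumerate_cons] at h
      simp only [List.getLast?_cons_cons] at h ⊢
      simp only [List.length_cons] at h ⊢
      simp [h, if_neg (List.cons_ne_nil z zs)]
      push_cast
      ring

-- ----- pvRuns in chunked form -----
theorem pvRuns_some_chunk (xs : List Int) : ∀ (s i : Int),
    pvRuns (some s) i xs
    = pvMkSeg s (i + ((xs.takeWhile (fun x => x != 0)).length : Int) - 1)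
        :: pvRuns none (i + ((xs.takeWhile (fun x => x != 0)).length : Int))
             (xs.drop (xs.takeWhile (fun x => x != 0)).length) := by
  induction xs with
  | nil => intro s i; simp [pvRuns]
  | cons x rest ih =>
    intro s i
    by_cases hx : x = 0
    · simp [pvRuns, hx, List.takeWhile_cons]
    · have := ih s (i + 1)
      simp only [pvRuns, hx]
      simp [List.takeWhile_cons, hx, this, Int.add_comm, Int.add_assoc,
        Int.add_sub_assoc]

-- ----- pvAltGo only looks at its argument past the falsy prefix -----
theorem pvAltGo_congr (l1 l2 : List (Int × Int))
    (h : l1.dropWhile (fun p => !(p.2 != 0)) = l2.dropWhile (fun p => !(p.2 != 0))) :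
    pvAltGo l1 = pvAltGo l2 := by
  rw [pvAltGo, pvAltGo, h]

-- ----- B equals pvRuns -----
theorem pvAltGo_eq_runs (n : Nat) : ∀ (xs : List Int) (i : Int), xs.length ≤ n →
    pvAltGo (PySem.List.enumerate xs i) = pvRuns none i xs := by
  induction n with
  | zero =>
    intro xs i hn
    have : xs = [] := List.eq_nil_of_length_eq_zero (Nat.le_zero.mp hn)
    subst this
    rw [pvAltGo]
    simp [PySem.List.enumerate, pvRuns]
  | succ m ih =>
    intro xs i hn
    cases xs with
    | nil =>
      rw [pvAltGo]; simp [PySem.List.enumerate, pvRuns]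
    | cons x rest =>
      simp only [List.length_cons, Nat.succ_le_succ_iff] at hn
      by_cases hx : x = 0
      · -- falsy head: the dropwhile skips it
        have hdw : (PySem.List.enumerate (x :: rest) i).dropWhile (fun p => !(p.2 != 0))
            = (PySem.List.enumerate rest (i + 1)).dropWhile (fun p => !(p.2 != 0)) := by
          rw [PySem.List.enumerate_cons]
          simp [List.dropWhile_cons, hx]
        rw [pvAltGo_congr _ _ hdw, ih rest (i + 1) hn]
        simp [pvRuns, hx]
      · -- truthy head: a run starts at index i
        have hdw : (PySem.List.enumerate (x :: rest) i).dropWhile (fun p => !(p.2 != 0))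
            = (i, x) :: PySem.List.enumerate rest (i + 1) := by
          rw [PySem.List.enumerate_cons]
          simp [List.dropWhile_cons, hx]
        rw [pvAltGo]
        split
        next heq =>
          rw [hdw] at heq; exact absurd heq (List.cons_ne_nil _ _)
        next p tl heq =>
          rw [hdw] at heq
          obtain ⟨hp, htl⟩ : p = (i, x) ∧ tl = PySem.List.enumerate rest (i + 1) := by
            constructor <;> simp [List.cons.injEq] at heq <;> tauto
          subst hp htl
          dsimp only
          have htw := pv_enum_takeWhile rest (i + 1)
          have hlast := pv_enum_getLast (rest.takeWhile (fun x => x != 0)) (i + 1) ((i : Int), x)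
          have hstop : (((PySem.List.enumerate rest (i + 1)).takeWhile
              (fun q => q.2 != 0)).getLast?.getD ((i : Int), x)).1
              = i + ((rest.takeWhile (fun x => x != 0)).length : Int) := by
            rw [htw, hlast]
            split
            next hnil => simp [hnil]
            next => push_cast; ring
          have hlen : ((PySem.List.enumerate rest (i + 1)).takeWhile
              (fun q => q.2 != 0)).length = (rest.takeWhile (fun x => x != 0)).length := by
            rw [htw, PySem.List.length_enumerate]
          have hdrop : (PySem.List.enumerate rest (i + 1)).drop
              (rest.takeWhile (fun x => x != 0)).length
              = PySem.List.enumerate (rest.drop (rest.takeWhile (fun x => x != 0)).length)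
                  (i + 1 + ((rest.takeWhile (fun x => x != 0)).length : Int)) :=
            pv_enum_drop rest _ (i + 1)
          have hrec : (rest.drop (rest.takeWhile (fun x => x != 0)).length).length ≤ m :=
            le_trans (by simp [List.length_drop]) hn
          rw [hstop, hlen, hdrop, ih _ _ hrec]
          have hruns : pvRuns none i (x :: rest)
              = pvMkSeg i (i + ((rest.takeWhile (fun x => x != 0)).length : Int))
                  :: pvRuns none (i + 1 + ((rest.takeWhile (fun x => x != 0)).length : Int))
                       (rest.drop (rest.takeWhile (fun x => x != 0)).length) := by
            have harith : i + 1 + ((rest.takeWhile (fun x => x != 0)).length : Int) - 1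
                = i + ((rest.takeWhile (fun x => x != 0)).length : Int) := by ring
            simp only [pvRuns]
            rw [if_pos (by simp [hx]), pvRuns_some_chunk, harith]
          rw [hruns]

-- ===== VERDICT (by name: the statement is the Claim_ definition above) =====
theorem frame_segments_py_spec : Claim_equal_frame_segments_py := by
  intro frame _
  unfold Spec_frame_segments_py frame_segments_py frame_segments_py_alt
  have hA := pvA_eq_runs ((PySem.Dict.mk frame).getD "nodeActive" []) 0 #[] none
  have hB := pvAltGo_eq_runs ((PySem.Dict.mk frame).getD "nodeActive" []).length
    ((PySem.Dict.mk frame).getD "nodeActive" []) 0 (le_refl _)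
  simp only [Int.zero_add] at hA
  simp only []
  rw [hB]
  simpa using hA
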